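-- pv_equiv track=rewrite | github.com/victorvishwa/Ai-Doc | backend/app/services/chat_service.py | format_structured_response
-- ===== SOURCE A (Python) =====
-- def format_structured_response(content: str) -> str:
--     """
--     Format the response into a structured format with clear sections
--     """
--     # Split content into sections
--     sections = content.split('\n\n')
--     formatted_response = []
--     current_section = []
--
--     for section in sections:
--         section = section.strip()
--         if not section:
--             continue
--
--         # Check if section is a list item or new section
--         if section.startswith(('-', '*', '1.', '2.', '3.', '4.', '5.', '6.', '7.', '8.', '9.')):
--             if current_section:
--                 formatted_response.append('\n'.join(current_section))
--                 current_section = []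
--             formatted_response.append(section)
--         elif section.startswith(('Definition:', 'Key Characteristics:', 'Impact:', 'Example:', 'Solution Approaches:', 'Challenges:')):
--             if current_section:
--                 formatted_response.append('\n'.join(current_section))
--                 current_section = []
--             formatted_response.append(f"\n{section}")
--         else:
--             current_section.append(section)
--
--     if current_section:
--         formatted_response.append('\n'.join(current_section))
--
--     return '\n\n'.join(formatted_response)
-- ===== SOURCE B (Python) =====
-- LIST_PFX = ('-', '*', '1.', '2.', '3.', '4.', '5.', '6.', '7.', '8.', '9.')
-- HDR_PFX = ('Definition:', 'Key Characteristics:', 'Impact:', 'Example:',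
--            'Solution Approaches:', 'Challenges:')
--
--
-- def _is_plain(s):
--     return not s.startswith(LIST_PFX) and not s.startswith(HDR_PFX)
--
--
-- def format_structured_response(content: str) -> str:
--     # classify-then-group-runs: clean first, then fold maximal runs of
--     # plain sections, instead of a stateful flush loop
--     secs = [t for t in (x.strip() for x in content.split('\n\n')) if t]
--     out = []
--     while secs:
--         s = secs[0]
--         if _is_plain(s):
--             k = 1
--             while k < len(secs) and _is_plain(secs[k]):
--                 k += 1
--             out.append('\n'.join(secs[:k]))
--             secs = secs[k:]
--         else:
--             out.append(s if s.startswith(LIST_PFX) else '\n' + s)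
--             secs = secs[1:]
--     return '\n\n'.join(out)
-- ===== Notes on version B (the rewrite author's own statement) =====
-- stated objective: alternative
-- what changed: Replaces A's stateful current_section-flush accumulator loop by a two-phase pass: first clean (strip, drop empties), then group maximal consecutive runs of plain sections with an inner run-scanning while loop and emit list/header sections directly.
import Mathlib
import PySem

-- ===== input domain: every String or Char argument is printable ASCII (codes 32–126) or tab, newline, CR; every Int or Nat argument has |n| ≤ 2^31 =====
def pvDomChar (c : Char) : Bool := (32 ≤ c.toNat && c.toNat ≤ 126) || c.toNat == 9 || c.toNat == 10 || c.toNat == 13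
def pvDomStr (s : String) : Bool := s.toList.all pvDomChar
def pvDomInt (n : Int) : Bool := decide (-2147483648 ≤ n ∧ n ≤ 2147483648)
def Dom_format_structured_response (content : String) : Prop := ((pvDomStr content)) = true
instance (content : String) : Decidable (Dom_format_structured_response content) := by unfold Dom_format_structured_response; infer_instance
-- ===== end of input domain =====

-- B replaces A's stateful current_section-flush loop by a classify-then-group-runs pass
-- over the cleaned section list (objective: alternative decomposition, same cost).


-- shared constant data: the two startswith prefix tuples of the Python sources
def pfxList : List String :=
  ["-", "*", "1.", "2.", "3.", "4.", "5.", "6.", "7.", "8.", "9."]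
def pfxHdr : List String :=
  ["Definition:", "Key Characteristics:", "Impact:", "Example:",
   "Solution Approaches:", "Challenges:"]
-- s.startswith(tuple): true iff s starts with any of the prefixes
def startsAny (s : String) (ps : List String) : Bool :=
  ps.any (fun p => PySem.Str.startswith s p)

-- ===== PORT A =====
-- one iteration of A's for-loop; state = (formatted_response, current_section)
def aStep (st : List String × List String) (sec : String) : List String × List String :=
  let s := PySem.Str.strip sec
  if s = "" then st
  else if startsAny s pfxList then
    let fr := if st.2 = [] then st.1 else st.1 ++ [PySem.Str.join "\n" st.2]
    (fr ++ [s], [])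
  else if startsAny s pfxHdr then
    let fr := if st.2 = [] then st.1 else st.1 ++ [PySem.Str.join "\n" st.2]
    (fr ++ ["\n" ++ s], [])
  else
    (st.1, st.2 ++ [s])

def format_structured_response (content : String) : String :=
  let sections := (PySem.Str.split? content "\n\n").getD []
  let st := sections.foldl aStep ([], [])
  let fr := if st.2 = [] then st.1 else st.1 ++ [PySem.Str.join "\n" st.2]
  PySem.Str.join "\n\n" fr

-- ===== PORT B =====
def isPlain (s : String) : Bool := !startsAny s pfxList && !startsAny s pfxHdr

-- B's outer while loop: group a maximal run of plain sections, else emit one section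
def altGo (secs : List String) : List String :=
  match secs with
  | [] => []
  | s :: rest =>
    if isPlain s then
      PySem.Str.join "\n" (s :: rest.takeWhile isPlain) :: altGo (rest.dropWhile isPlain)
    else
      (if startsAny s pfxList then s else "\n" ++ s) :: altGo rest
termination_by secs.length
decreasing_by
  · exact Nat.lt_succ_of_le (rest.length_dropWhile_le isPlain)
  · simp

def format_structured_response_alt (content : String) : String :=
  let secs := (((PySem.Str.split? content "\n\n").getD []).map PySem.Str.strip).filter (fun t => t ≠ "")
  PySem.Str.join "\n\n" (altGo secs)

-- ===== PRECONDITION & SPEC =====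
def Spec_format_structured_response (content : String) (out : String) : Prop := out = format_structured_response_alt content
instance (content : String) (out : String) : Decidable (Spec_format_structured_response content out) := by unfold Spec_format_structured_response; infer_instance

-- ===== CLAIM (what is proved, stated in full; the proofs are below) =====
def Claim_equal_format_structured_response : Prop := ∀ (content : String), Dom_format_structured_response content → Spec_format_structured_response content (format_structured_response content)

-- ===== LEMMAS AND PROOFS =====

-- A's loop step on an already-cleaned (stripped, nonempty) section
def cStep (st : List String × List String) (s : String) : List String × List String :=
  if startsAny s pfxList then
    ((if st.2 = [] then st.1 else st.1 ++ [PySem.Str.join "\n" st.2]) ++ [s], [])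
  else if startsAny s pfxHdr then
    ((if st.2 = [] then st.1 else st.1 ++ [PySem.Str.join "\n" st.2]) ++ ["\n" ++ s], [])
  else
    (st.1, st.2 ++ [s])

def flush (cur : List String) : List String :=
  if cur = [] then [] else [PySem.Str.join "\n" cur]

-- A's fold over raw sections = the clean fold over the stripped, nonempty sections
theorem foldl_aStep_eq (l : List String) : ∀ st,
    l.foldl aStep st = ((l.map PySem.Str.strip).filter (fun t => t ≠ "")).foldl cStep st := by
  induction l with
  | nil => intro st; rfl
  | cons x t ih =>
    intro st
    simp only [List.foldl_cons, List.map_cons, List.filter_cons]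
    by_cases h : PySem.Str.strip x = ""
    · have : aStep st x = st := by simp [aStep, h]
      simp [this, h, ih]
    · have : aStep st x = cStep st (PySem.Str.strip x) := by
        simp [aStep, cStep, h]
      simp [this, h, ih]

-- the clean fold with accumulator, expressed output-first
def go (cur : List String) (l : List String) : List String :=
  match l with
  | [] => flush cur
  | s :: t =>
    if isPlain s then go (cur ++ [s]) t
    else flush cur ++ ((if startsAny s pfxList then s else "\n" ++ s) :: go [] t)

theorem cStep_plain (st : List String × List String) (s : String) (h : isPlain s = true) :
    cStep st s = (st.1, st.2 ++ [s]) := by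
  simp only [isPlain, Bool.and_eq_true, Bool.not_eq_true'] at h
  simp [cStep, h.1, h.2]

theorem cStep_not_plain (st : List String × List String) (s : String) (h : isPlain s = false) :
    cStep st s = ((if st.2 = [] then st.1 else st.1 ++ [PySem.Str.join "\n" st.2]) ++
      [if startsAny s pfxList then s else "\n" ++ s], []) := by
  simp only [isPlain, Bool.and_eq_false_iff, Bool.not_eq_false'] at h
  rcases h with h | h
  · simp [cStep, h]
  · by_cases hl : startsAny s pfxList
    · simp [cStep, hl]
    · simp [cStep, hl, h]

theorem foldl_cStep_eq_go (l : List String) : ∀ fr cur,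
    (let st := l.foldl cStep (fr, cur)
     if st.2 = [] then st.1 else st.1 ++ [PySem.Str.join "\n" st.2]) = fr ++ go cur l := by
  induction l with
  | nil =>
    intro fr cur
    by_cases h : cur = [] <;> simp [go, flush, h]
  | cons s t ih =>
    intro fr cur
    by_cases h : isPlain s
    · simpa [go, h, cStep_plain _ _ h] using ih fr (cur ++ [s])
    · have h' : isPlain s = false := by simpa using h
      simp only [List.foldl_cons, cStep_not_plain _ _ h', go, h']
      rw [ih]
      by_cases hc : cur = [] <;> simp [flush, hc]

theorem altGo_cons (s : String) (rest : List String) :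
    altGo (s :: rest) =
      (if isPlain s then
        PySem.Str.join "\n" (s :: rest.takeWhile isPlain) :: altGo (rest.dropWhile isPlain)
      else
        (if startsAny s pfxList then s else "\n" ++ s) :: altGo rest) := by
  rw [altGo.eq_def]

-- go with a nonempty accumulator absorbs the leading plain run; go [] is altGo
theorem go_eq_altGo (l : List String) :
    (go [] l = altGo l) ∧
    (∀ cur, cur ≠ [] →
      go cur l = PySem.Str.join "\n" (cur ++ l.takeWhile isPlain) :: altGo (l.dropWhile isPlain)) := by
  induction l with
  | nil =>
    refine ⟨by simp [go, flush, altGo], fun cur hc => ?_⟩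
    simp [go, flush, hc, altGo]
  | cons s t ih =>
    constructor
    · by_cases h : isPlain s
      · rw [go, altGo_cons]
        simp only [h, if_pos, List.nil_append]
        rw [(ih.2 [s] (by simp))]
        simp
      · have h' : isPlain s = false := by simpa using h
        rw [go, altGo_cons]
        simp [h', flush, ih.1]
    · intro cur hc
      by_cases h : isPlain s
      · rw [go]
        simp only [h, if_pos]
        rw [ih.2 (cur ++ [s]) (by simp)]
        simp [h]
      · have h' : isPlain s = false := by simpa using h
        simp [go, altGo_cons, h', flush, hc, ih.1]

-- ===== VERDICT (by name: the statement is the Claim_ definition above) =====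
theorem format_structured_response_spec : Claim_equal_format_structured_response := by
  intro content _
  unfold Spec_format_structured_response format_structured_response format_structured_response_alt
  dsimp only
  rw [foldl_aStep_eq]
  have := foldl_cStep_eq_go
    ((((PySem.Str.split? content "\n\n").getD []).map PySem.Str.strip).filter (fun t => t ≠ "")) [] []
  simp only [List.nil_append] at this
  rw [this, (go_eq_altGo _).1]
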